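-- pv_equiv track=rewrite | github.com/solo21-12/A2SV_Progress | contest/C_Avoid_Trygub.py | solve
-- ===== SOURCE A (Python) =====
-- def solve(word):
--     res = []
--     s = set(list("trygub"))
--     c = [0 for _ in range(26)]
--     b = 0
--     for ch in word:
--         if ch in s:
--             c[ord(ch) - ord("a")] += 1
--         else:
--             res.append(ch)
--
--     for ch in "bugyrt":
--         if c[ord(ch) - ord("a")] > 0:
--             res.extend(ch * c[ord(ch) - ord("a")])
--
--     return "".join(res)
-- ===== SOURCE B (Python) =====
-- def solve(word):
--     special_set = set("trygub")
--     kept = [ch for ch in word if ch not in special_set]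
--     special = [ch for ch in word if ch in special_set]
--     return "".join(kept + sorted(special, key="bugyrt".index))
-- ===== Notes on version B (the rewrite author's own statement) =====
-- stated objective: simpler
-- what changed: Replaces the 26-slot count array with grouped emission by a partition into kept/special comprehensions followed by a stable sort of the special characters keyed by their position in 'bugyrt'.
import Mathlib
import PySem

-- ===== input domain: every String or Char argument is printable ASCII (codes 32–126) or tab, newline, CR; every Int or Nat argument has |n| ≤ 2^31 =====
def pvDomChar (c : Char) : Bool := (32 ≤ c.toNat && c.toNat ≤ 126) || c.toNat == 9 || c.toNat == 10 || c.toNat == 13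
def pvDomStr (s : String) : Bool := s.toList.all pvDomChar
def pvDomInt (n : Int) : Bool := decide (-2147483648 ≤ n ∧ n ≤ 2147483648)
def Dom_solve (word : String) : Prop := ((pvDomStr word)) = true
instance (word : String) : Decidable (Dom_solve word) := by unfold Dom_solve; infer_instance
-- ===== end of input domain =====

-- B replaces A's 26-slot count array and grouped emission by partition-then-stable-sort; objective: simpler.

-- ===== PORT A =====
-- first loop of A: res collects non-special chars, c counts special ones.
-- c[ord(ch) - ord('a')] += 1: the index is always in range (ch is one of 'trygub'), so List.set/List.getD are exact here.
def solveLoop1 : List Char → List Char → List Int → List Char × List Int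
  | [], res, c => (res, c)
  | ch :: rest, res, c =>
    if PySem.Set.contains (PySem.Set.ofList "trygub".toList) ch then
      solveLoop1 rest res (c.set (ch.toNat - 97) (c.getD (ch.toNat - 97) 0 + 1))
    else
      solveLoop1 rest (res ++ [ch]) c

def solve (word : String) : String :=
  let p := solveLoop1 word.toList [] (List.replicate 26 0)
  let res2 := "bugyrt".toList.foldl (fun r ch =>
      if p.2.getD (ch.toNat - 97) 0 > 0 then
        r ++ PySem.List.pyRepeat [ch] (p.2.getD (ch.toNat - 97) 0)
      else r) p.1
  String.ofList res2

-- ===== PORT B =====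
-- key 'bugyrt'.index(ch): every sorted element is a char of "bugyrt", so .index never raises and equals .find
def solve_alt (word : String) : String :=
  let specialSet : PySem.Set Char := PySem.Set.ofList "trygub".toList
  let kept := word.toList.filter (fun ch => !(PySem.Set.contains specialSet ch))
  let special := word.toList.filter (fun ch => PySem.Set.contains specialSet ch)
  let sortedSpecial := PySem.List.sorted special (fun ch => PySem.Str.find "bugyrt" (String.singleton ch)) false
  String.ofList (kept ++ sortedSpecial)

-- ===== PRECONDITION & SPEC =====
def Spec_solve (word : String) (out : String) : Prop := out = solve_alt word
instance (word : String) (out : String) : Decidable (Spec_solve word out) := by unfold Spec_solve; infer_instance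

-- ===== CLAIM (what is proved, stated in full; the proofs are below) =====
def Claim_equal_solve : Prop := ∀ (word : String), Dom_solve word → Spec_solve word (solve word)

-- ===== LEMMAS AND PROOFS =====

-- abbreviations used by the proofs
def pvKey (ch : Char) : Int := PySem.Str.find "bugyrt" (String.singleton ch)
def pvMem (ch : Char) : Bool := PySem.Set.contains (PySem.Set.ofList "trygub".toList) ch

-- any two key-nondecreasing permutations with an injective-on-members key are equal (stable-sort uniqueness)
theorem pv_stable_unique {α κ : Type} [LinearOrder κ] (k : α → κ) :
    ∀ (l1 l2 : List α), l1.Perm l2 → l1.Pairwise (fun a b => k a ≤ k b) →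
    l2.Pairwise (fun a b => k a ≤ k b) →
    (∀ a ∈ l1, ∀ b ∈ l1, k a = k b → a = b) → l1 = l2 := by
  intro l1
  induction l1 with
  | nil => intro l2 hp _ _ _; exact (hp.nil_eq).symm ▸ rfl
  | cons a t1 ih =>
    intro l2 hp h1 h2 hinj
    cases l2 with
    | nil => exact absurd hp.symm (by simp)
    | cons b t2 =>
      have hab : a = b := by
        by_cases hab : a = b
        · exact hab
        · have ha2 : a ∈ t2 := by
            have := hp.mem_iff.mp (List.mem_cons_self)
            simpa [hab] using this
          have hb1 : b ∈ t1 := by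
            have := hp.symm.mem_iff.mp (List.mem_cons_self)
            simpa [Ne.symm hab] using this
          have h1' := (List.pairwise_cons.mp h1).1 b hb1
          have h2' := (List.pairwise_cons.mp h2).1 a ha2
          exact hinj a List.mem_cons_self b (List.mem_cons_of_mem _ hb1) (le_antisymm h1' h2')
      subst hab
      have hp' := hp.cons_inv
      have ht := ih t2 hp' (List.pairwise_cons.mp h1).2 (List.pairwise_cons.mp h2).2
        (fun x hx y hy => hinj x (List.mem_cons_of_mem _ hx) y (List.mem_cons_of_mem _ hy))
      rw [ht]

theorem pv_loop1_fst : ∀ (l res : List Char) (c : List Int),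
    (solveLoop1 l res c).1 = res ++ l.filter (fun ch => !(pvMem ch)) := by
  intro l
  induction l with
  | nil => intro res c; simp [solveLoop1]
  | cons ch rest ih =>
    intro res c
    rw [solveLoop1]
    simp only [show ∀ x, PySem.Set.contains (PySem.Set.ofList "trygub".toList) x = pvMem x
      from fun _ => rfl]
    by_cases h : pvMem ch = true
    · rw [if_pos h]; simp [ih, h]
    · rw [if_neg (by simp [h])]
      simp at h
      simp [ih, h]

theorem pv_loop1_snd : ∀ (l res : List Char) (c : List Int), c.length = 26 →
    ∀ ch ∈ "trygub".toList,
      (solveLoop1 l res c).2.getD (ch.toNat - 97) 0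
        = c.getD (ch.toNat - 97) 0 + (l.count ch : Int) := by
  intro l
  induction l with
  | nil => intro res c _ ch _; simp [solveLoop1]
  | cons x rest ih =>
    intro res c hc ch hch
    rw [solveLoop1]
    simp only [show ∀ y, PySem.Set.contains (PySem.Set.ofList "trygub".toList) y = pvMem y
      from fun _ => rfl]
    by_cases h : pvMem x = true
    · rw [if_pos h]
      have hx : x ∈ "trygub".toList := by
        simpa [pvMem, PySem.Set.contains_iff] using h
      have hlen : (c.set (x.toNat - 97) (c.getD (x.toNat - 97) 0 + 1)).length = 26 := by
        simp [hc]
      rw [ih _ _ hlen ch hch]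
      by_cases hxch : x = ch
      · subst hxch
        have hx' : x = 't' ∨ x = 'r' ∨ x = 'y' ∨ x = 'g' ∨ x = 'u' ∨ x = 'b' := by
          simpa using hx
        have hidx : x.toNat - 97 < c.length := by
          rw [hc]
          rcases hx' with h|h|h|h|h|h <;> subst h <;> decide
        rw [List.count_cons_self]
        simp [List.getD_eq_getElem?_getD, hidx]
        ring
      · have hx' : x = 't' ∨ x = 'r' ∨ x = 'y' ∨ x = 'g' ∨ x = 'u' ∨ x = 'b' := by
          simpa using hx
        have hch' : ch = 't' ∨ ch = 'r' ∨ ch = 'y' ∨ ch = 'g' ∨ ch = 'u' ∨ ch = 'b' := by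
          simpa using hch
        have hne : x.toNat - 97 ≠ ch.toNat - 97 := by
          rcases hx' with h1|h1|h1|h1|h1|h1 <;> rcases hch' with h2|h2|h2|h2|h2|h2 <;>
            subst h1 <;> subst h2 <;> first | (exact absurd rfl hxch) | decide
        rw [List.count_cons_of_ne hxch]
        simp [List.getD_eq_getElem?_getD, hne]
    · rw [if_neg (by simp [h])]
      rw [ih _ _ hc ch hch]
      have hxch : x ≠ ch := by
        intro he
        subst he
        simp [pvMem] at h
        simp at hch
        tauto
      rw [List.count_cons_of_ne hxch]

-- a replicate-concatenation along a key-nondecreasing char list is key-nondecreasing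
theorem pv_flatMap_pairwise (cnt : Char → Nat) :
    ∀ cs : List Char, cs.Pairwise (fun a b => pvKey a ≤ pvKey b) →
    (cs.flatMap fun c => List.replicate (cnt c) c).Pairwise (fun a b => pvKey a ≤ pvKey b) := by
  intro cs
  induction cs with
  | nil => intro _; simp
  | cons c cs ih =>
    intro hp
    rw [List.flatMap_cons]
    apply List.pairwise_append.mpr
    refine ⟨?_, ih (List.pairwise_cons.mp hp).2, ?_⟩
    · exact List.pairwise_replicate.mpr (Or.inr (le_refl _))
    · intro a hma b hmb
      have ha : a = c := List.eq_of_mem_replicate hma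
      obtain ⟨d, hd, hb⟩ := List.mem_flatMap.mp hmb
      have hb' : b = d := List.eq_of_mem_replicate hb
      subst ha; subst hb'
      exact (List.pairwise_cons.mp hp).1 _ hd

-- sorted specials = the groups b,u,g,y,r,t
theorem pv_sorted_groups (special : List Char) (hs : ∀ a ∈ special, a ∈ "trygub".toList) :
    PySem.List.sorted special pvKey false
      = "bugyrt".toList.flatMap (fun ch => List.replicate (special.count ch) ch) := by
  have hperm : ("bugyrt".toList.flatMap
      (fun ch => List.replicate (special.count ch) ch)).Perm special := by
    rw [List.perm_iff_count]
    intro a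
    by_cases ha : a ∈ "bugyrt".toList
    · have ha' : a = 'b' ∨ a = 'u' ∨ a = 'g' ∨ a = 'y' ∨ a = 'r' ∨ a = 't' := by
        simpa using ha
      rcases ha' with h|h|h|h|h|h <;> subst h <;>
        simp [List.count_append, List.count_replicate]
    · have ha1 : ∀ c ∈ "bugyrt".toList, a ≠ c := fun c hc he => ha (he ▸ hc)
      have h2 : special.count a = 0 := by
        rw [List.count_eq_zero]
        intro hmem
        have := hs a hmem
        simp at this ha
        tauto
      simp at ha
      simp [List.count_append, List.count_replicate, h2]
      refine ⟨fun he => ?_, fun he => ?_, fun he => ?_, fun he => ?_, fun he => ?_,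
        fun he => ?_⟩ <;> (subst he; exact h2)
  have hpw : ("bugyrt".toList.flatMap
      (fun ch => List.replicate (special.count ch) ch)).Pairwise
      (fun a b => pvKey a ≤ pvKey b) :=
    pv_flatMap_pairwise _ _ (by decide)
  exact pv_stable_unique pvKey _ _
    ((PySem.List.sorted_perm special pvKey false).trans hperm.symm)
    (PySem.List.sorted_pairwise special pvKey)
    hpw
    (by
      intro a hma b hmb hk
      have ha := hs a ((PySem.List.mem_sorted _ _ _ _).mp hma)
      have hb := hs b ((PySem.List.mem_sorted _ _ _ _).mp hmb)
      have ha' : a = 't' ∨ a = 'r' ∨ a = 'y' ∨ a = 'g' ∨ a = 'u' ∨ a = 'b' := by simpa using ha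
      have hb' : b = 't' ∨ b = 'r' ∨ b = 'y' ∨ b = 'g' ∨ b = 'u' ∨ b = 'b' := by simpa using hb
      rcases ha' with h|h|h|h|h|h <;> rcases hb' with h2|h2|h2|h2|h2|h2 <;>
        subst h <;> subst h2 <;> first | rfl | (exact absurd hk (by decide)))

-- second loop of A: emitting the guarded replicates is appending the groups
theorem pv_loop2 (g : Char → Int) :
    ∀ (cs : List Char) (r : List Char),
      cs.foldl (fun r ch => if g ch > 0 then r ++ PySem.List.pyRepeat [ch] (g ch) else r) r
        = r ++ cs.flatMap (fun ch => List.replicate (g ch).toNat ch) := by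
  intro cs
  induction cs with
  | nil => intro r; simp
  | cons c cs ih =>
    intro r
    rw [List.foldl_cons, List.flatMap_cons, ih]
    by_cases h : g c > 0
    · simp [h, PySem.List.pyRepeat_singleton]
    · have h0 : (g c).toNat = 0 := by omega
      simp [h, h0]

-- A computes: the kept characters, then for each of b,u,g,y,r,t its occurrences in word
theorem pv_solve_eq (word : String) :
    solve word = String.ofList (word.toList.filter (fun ch => !(pvMem ch))
      ++ "bugyrt".toList.flatMap
          (fun ch => List.replicate (word.toList.count ch) ch)) := by
  rw [solve]
  have hfst := pv_loop1_fst word.toList [] (List.replicate 26 0)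
  have hsnd := pv_loop1_snd word.toList [] (List.replicate 26 0) (by simp)
  rw [pv_loop2]
  rw [hfst]
  simp only [List.nil_append]
  congr 1
  congr 1
  apply List.flatMap_congr
  intro c hc
  have hc' : c ∈ "trygub".toList := by
    simp at hc ⊢
    tauto
  have hc6 : c = 't' ∨ c = 'r' ∨ c = 'y' ∨ c = 'g' ∨ c = 'u' ∨ c = 'b' := by
    simpa using hc'
  rw [hsnd c hc']
  rcases hc6 with h|h|h|h|h|h <;> subst h <;> simp

theorem solve_alt_eq (word : String) :
    solve_alt word = String.ofList (word.toList.filter (fun ch => !(pvMem ch))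
      ++ "bugyrt".toList.flatMap
          (fun ch => List.replicate (word.toList.count ch) ch)) := by
  rw [solve_alt]
  simp only [show (fun ch => PySem.Str.find "bugyrt" (String.singleton ch)) = pvKey
    from rfl]
  simp only [show (fun ch => PySem.Set.contains (PySem.Set.ofList "trygub".toList) ch)
      = pvMem from rfl]
  rw [pv_sorted_groups]
  · congr 1
    congr 1
    apply List.flatMap_congr
    intro c hc
    have hmc : pvMem c = true := by
      simp [pvMem]
      simp at hc
      tauto
    rw [List.count_filter]
    simp [hmc]
  · intro a ha
    have := (List.mem_filter.mp ha).2
    simpa [pvMem, PySem.Set.contains_iff] using this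

-- ===== VERDICT (by name: the statement is the Claim_ definition above) =====
theorem solve_spec : Claim_equal_solve := by
  unfold Claim_equal_solve
  intro word _
  unfold Spec_solve
  rw [pv_solve_eq, solve_alt_eq]
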